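-- pv_equiv track=rewrite | github.com/MonicaRondon/CIT590 | Assignment 05 Squarelotron/Assignment5Rondon/squarelotron.py | upside_down_flip
-- ===== SOURCE A (Python) =====
-- def make_squarelotron(list):
--     """Given a "flat" list of 25 numbers, make and return a squarelotron"""
--     assert len(list) == 25
--     # take list of 25 numbers
--     # tell computer to take the first 5 numbers and put into 1 list
--     # tell computer to take the next 5 numbers and put into 1 list
--     # do this three more times
--     # return new list of lists
--     squarelotron = []
--     for i in range(0, 25, 5):
--         squarelotron.append(list[i: i + 5])
--     return squarelotron
--
-- def make_list(squarelotron):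
--     """Given a squarelotron, makes and returns a flat list of 25 numbers"""
--     list = []
--     #take squarelotron list, add the first row to the empty list
--     #add the second row to the empty list
--     #do this three more times
--     #return full flat list
--     for row in squarelotron:
--         list = list + row
--     return list
--
-- def swap(list, index, distance):
--     """swaps two spots on a FLAT list based on a starter index and distance
--     between the starter and end index"""
--     hold = list[index]
--     list[index] = list[index + distance] #flips location value
--     list[index + distance] = hold
--
-- def upside_down_flip(squarelotron, ring):
--     """Performs the Upside-Down Flip of the squarelotron
--     and returns the new squarelotron."""
--     new_squarelotron = make_list(squarelotron)
--     if ring == "inner":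
--         for i in range(6,9):
--             swap(new_squarelotron, i, 10)
--         return make_squarelotron(new_squarelotron)
--     if ring == "outer":
--         for i in range(0,5):
--             swap(new_squarelotron, i, 20)
--         swap(new_squarelotron, 5, 10)
--         swap(new_squarelotron, 9, 10)
--     return make_squarelotron(new_squarelotron)
-- ===== SOURCE B (Python) =====
-- def upside_down_flip(squarelotron, ring):
--     """Performs the Upside-Down Flip of the squarelotron
--     and returns the new squarelotron."""
--     assert len(squarelotron) == 5 and all(len(row) == 5 for row in squarelotron)
--     g = [row[:] for row in squarelotron]
--     if ring == "inner":
--         g[1][1:4], g[3][1:4] = g[3][1:4], g[1][1:4]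
--     elif ring == "outer":
--         g[0], g[4] = g[4], g[0]
--         g[1][0], g[3][0] = g[3][0], g[1][0]
--         g[1][4], g[3][4] = g[3][4], g[1][4]
--     return g
-- ===== Notes on version B (the rewrite author's own statement) =====
-- stated objective: simpler
-- what changed: B works directly on the 2D grid (shallow-copying the 5 rows and swapping the affected row segments) instead of flattening the grid to a 25-element list, index-swapping, and re-chunking.
import Mathlib
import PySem

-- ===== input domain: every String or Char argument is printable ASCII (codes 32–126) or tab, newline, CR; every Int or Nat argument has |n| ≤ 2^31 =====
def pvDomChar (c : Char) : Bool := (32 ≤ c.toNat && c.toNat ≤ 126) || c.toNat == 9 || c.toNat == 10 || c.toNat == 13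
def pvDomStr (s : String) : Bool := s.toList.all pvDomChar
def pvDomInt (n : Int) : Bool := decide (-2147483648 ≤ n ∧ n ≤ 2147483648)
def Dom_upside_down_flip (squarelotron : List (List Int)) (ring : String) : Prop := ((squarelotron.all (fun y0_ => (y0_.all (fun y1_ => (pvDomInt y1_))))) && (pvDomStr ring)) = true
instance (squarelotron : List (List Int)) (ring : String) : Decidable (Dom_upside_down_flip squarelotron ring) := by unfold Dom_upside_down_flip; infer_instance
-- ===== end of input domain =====

-- B flips the ring by swapping row segments directly on a shallow copy of the 5x5 grid,
-- instead of A's flatten / index-swap / re-chunk; same values, simpler decomposition; neither mutates its argument.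

-- ===== PORT A =====
-- swap(list, index, distance): in-place swap of two flat-list slots; ported as a pure update.
-- Indices are always in range under Pre_ (flat length 25, max index 24), so pySetD/pyGetD are exact here.
def pvSwap (l : List Int) (index : Int) (distance : Int) : List Int :=
  let hold := PySem.List.pyGetD l index 0
  let l1 := PySem.List.pySetD l index (PySem.List.pyGetD l (index + distance) 0)
  PySem.List.pySetD l1 (index + distance) hold

-- make_list: concatenate the rows
def pvMakeList (squarelotron : List (List Int)) : List Int :=
  squarelotron.foldl (fun acc row => acc ++ row) []

-- make_squarelotron: rechunk 25 numbers into 5 rows (the assert len == 25 is Pre_'s)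
def pvMakeSquarelotron (l : List Int) : List (List Int) :=
  (PySem.List.pyRange 0 25 5).foldl
    (fun acc i => acc ++ [PySem.List.slice l (some i) (some (i + 5))]) []

def upside_down_flip (squarelotron : List (List Int)) (ring : String) : List (List Int) :=
  let ns := pvMakeList squarelotron
  if ring = "inner" then
    pvMakeSquarelotron ((PySem.List.pyRange 6 9 1).foldl (fun l i => pvSwap l i 10) ns)
  else
    if ring = "outer" then
      let ns := (PySem.List.pyRange 0 5 1).foldl (fun l i => pvSwap l i 20) ns
      let ns := pvSwap ns 5 10
      let ns := pvSwap ns 9 10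
      pvMakeSquarelotron ns
    else
      pvMakeSquarelotron ns

-- ===== PORT B =====
-- row[1:4] assignment: replace positions 1..3 of `row` by src[1:4]
def pvSetMid (row src : List Int) : List Int :=
  row.take 1 ++ PySem.List.slice src (some 1) (some 4) ++ row.drop 4

-- swap-in of the two end cells: row with row[0] := src[0], row[4] := src[4]
def pvSetEnds (row src : List Int) : List Int :=
  (row.set 0 (src.getD 0 0)).set 4 (src.getD 4 0)

def upside_down_flip_alt (squarelotron : List (List Int)) (ring : String) : List (List Int) :=
  let g := squarelotron.map (fun row => row)   -- shallow copy of each row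
  if ring = "inner" then
    let r1 := g.getD 1 []
    let r3 := g.getD 3 []
    (g.set 1 (pvSetMid r1 r3)).set 3 (pvSetMid r3 r1)
  else
    if ring = "outer" then
      let r0 := g.getD 0 []
      let r4 := g.getD 4 []
      let r1 := g.getD 1 []
      let r3 := g.getD 3 []
      (((g.set 0 r4).set 4 r0).set 1 (pvSetEnds r1 r3)).set 3 (pvSetEnds r3 r1)
    else
      g

-- ===== PRECONDITION & SPEC =====
-- Pre_ excludes inputs whose rows do not form a 5x5 grid: on those A's `assert len == 25` raises
-- AssertionError (and so does B's shape assertion), except on non-5x5 inputs whose rows flatten to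
-- exactly 25 numbers, where A returns a freshly re-chunked 5x5 grid while B's shape assertion raises.
def Pre_upside_down_flip (squarelotron : List (List Int)) (ring : String) : Prop :=
  squarelotron.length = 5 ∧ squarelotron.all (fun row => row.length = 5) = true
instance (squarelotron : List (List Int)) (ring : String) : Decidable (Pre_upside_down_flip squarelotron ring) := by unfold Pre_upside_down_flip; infer_instance

def pvWitness_upside_down_flip : List (List Int) × String :=
  ([[1,2,3,4,5],[6,7,8,9,10],[11,12,13,14,15],[16,17,18,19,20],[21,22,23,24,25]], "outer")

def Spec_upside_down_flip (squarelotron : List (List Int)) (ring : String) (out : List (List Int)) : Prop := out = upside_down_flip_alt squarelotron ring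
instance (squarelotron : List (List Int)) (ring : String) (out : List (List Int)) : Decidable (Spec_upside_down_flip squarelotron ring out) := by unfold Spec_upside_down_flip; infer_instance

-- ===== CLAIM (what is proved, stated in full; the proofs are below) =====
def Claim_equal_upside_down_flip : Prop := ∀ (squarelotron : List (List Int)) (ring : String), Dom_upside_down_flip squarelotron ring → Pre_upside_down_flip squarelotron ring → Spec_upside_down_flip squarelotron ring (upside_down_flip squarelotron ring)

-- ===== LEMMAS AND PROOFS =====

theorem pvRow5 (r : List Int) (h : r.length = 5) :
    ∃ a b c d e : Int, r = [a, b, c, d, e] := by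
  match r, h with
  | [a, b, c, d, e], _ => exact ⟨a, b, c, d, e, rfl⟩

-- rechunking a flat 25-tuple, evaluated once and for all
theorem pvMS (a0 a1 a2 a3 a4 b0 b1 b2 b3 b4 c0 c1 c2 c3 c4 d0 d1 d2 d3 d4 e0 e1 e2 e3 e4 : Int) :
    pvMakeSquarelotron [a0,a1,a2,a3,a4,b0,b1,b2,b3,b4,c0,c1,c2,c3,c4,d0,d1,d2,d3,d4,e0,e1,e2,e3,e4]
    = [[a0,a1,a2,a3,a4],[b0,b1,b2,b3,b4],[c0,c1,c2,c3,c4],[d0,d1,d2,d3,d4],[e0,e1,e2,e3,e4]] := rfl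

-- flattening a 5x5 grid
theorem pvML (a0 a1 a2 a3 a4 b0 b1 b2 b3 b4 c0 c1 c2 c3 c4 d0 d1 d2 d3 d4 e0 e1 e2 e3 e4 : Int) :
    pvMakeList [[a0,a1,a2,a3,a4],[b0,b1,b2,b3,b4],[c0,c1,c2,c3,c4],[d0,d1,d2,d3,d4],[e0,e1,e2,e3,e4]] = [a0,a1,a2,a3,a4,b0,b1,b2,b3,b4,c0,c1,c2,c3,c4,d0,d1,d2,d3,d4,e0,e1,e2,e3,e4] := rfl

-- the individual flat-list swaps of A, evaluated once and for all
theorem pvSwI0 (a0 a1 a2 a3 a4 b0 b1 b2 b3 b4 c0 c1 c2 c3 c4 d0 d1 d2 d3 d4 e0 e1 e2 e3 e4 : Int) :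
    pvSwap [a0,a1,a2,a3,a4,b0,b1,b2,b3,b4,c0,c1,c2,c3,c4,d0,d1,d2,d3,d4,e0,e1,e2,e3,e4] 6 10 = [a0,a1,a2,a3,a4,b0,d1,b2,b3,b4,c0,c1,c2,c3,c4,d0,b1,d2,d3,d4,e0,e1,e2,e3,e4] := rfl

theorem pvSwI1 (a0 a1 a2 a3 a4 b0 b1 b2 b3 b4 c0 c1 c2 c3 c4 d0 d1 d2 d3 d4 e0 e1 e2 e3 e4 : Int) :
    pvSwap [a0,a1,a2,a3,a4,b0,d1,b2,b3,b4,c0,c1,c2,c3,c4,d0,b1,d2,d3,d4,e0,e1,e2,e3,e4] 7 10 = [a0,a1,a2,a3,a4,b0,d1,d2,b3,b4,c0,c1,c2,c3,c4,d0,b1,b2,d3,d4,e0,e1,e2,e3,e4] := rfl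

theorem pvSwI2 (a0 a1 a2 a3 a4 b0 b1 b2 b3 b4 c0 c1 c2 c3 c4 d0 d1 d2 d3 d4 e0 e1 e2 e3 e4 : Int) :
    pvSwap [a0,a1,a2,a3,a4,b0,d1,d2,b3,b4,c0,c1,c2,c3,c4,d0,b1,b2,d3,d4,e0,e1,e2,e3,e4] 8 10 = [a0,a1,a2,a3,a4,b0,d1,d2,d3,b4,c0,c1,c2,c3,c4,d0,b1,b2,b3,d4,e0,e1,e2,e3,e4] := rfl

theorem pvSwO0 (a0 a1 a2 a3 a4 b0 b1 b2 b3 b4 c0 c1 c2 c3 c4 d0 d1 d2 d3 d4 e0 e1 e2 e3 e4 : Int) :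
    pvSwap [a0,a1,a2,a3,a4,b0,b1,b2,b3,b4,c0,c1,c2,c3,c4,d0,d1,d2,d3,d4,e0,e1,e2,e3,e4] 0 20 = [e0,a1,a2,a3,a4,b0,b1,b2,b3,b4,c0,c1,c2,c3,c4,d0,d1,d2,d3,d4,a0,e1,e2,e3,e4] := rfl

theorem pvSwO1 (a0 a1 a2 a3 a4 b0 b1 b2 b3 b4 c0 c1 c2 c3 c4 d0 d1 d2 d3 d4 e0 e1 e2 e3 e4 : Int) :
    pvSwap [e0,a1,a2,a3,a4,b0,b1,b2,b3,b4,c0,c1,c2,c3,c4,d0,d1,d2,d3,d4,a0,e1,e2,e3,e4] 1 20 = [e0,e1,a2,a3,a4,b0,b1,b2,b3,b4,c0,c1,c2,c3,c4,d0,d1,d2,d3,d4,a0,a1,e2,e3,e4] := rfl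

theorem pvSwO2 (a0 a1 a2 a3 a4 b0 b1 b2 b3 b4 c0 c1 c2 c3 c4 d0 d1 d2 d3 d4 e0 e1 e2 e3 e4 : Int) :
    pvSwap [e0,e1,a2,a3,a4,b0,b1,b2,b3,b4,c0,c1,c2,c3,c4,d0,d1,d2,d3,d4,a0,a1,e2,e3,e4] 2 20 = [e0,e1,e2,a3,a4,b0,b1,b2,b3,b4,c0,c1,c2,c3,c4,d0,d1,d2,d3,d4,a0,a1,a2,e3,e4] := rfl

theorem pvSwO3 (a0 a1 a2 a3 a4 b0 b1 b2 b3 b4 c0 c1 c2 c3 c4 d0 d1 d2 d3 d4 e0 e1 e2 e3 e4 : Int) :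
    pvSwap [e0,e1,e2,a3,a4,b0,b1,b2,b3,b4,c0,c1,c2,c3,c4,d0,d1,d2,d3,d4,a0,a1,a2,e3,e4] 3 20 = [e0,e1,e2,e3,a4,b0,b1,b2,b3,b4,c0,c1,c2,c3,c4,d0,d1,d2,d3,d4,a0,a1,a2,a3,e4] := rfl

theorem pvSwO4 (a0 a1 a2 a3 a4 b0 b1 b2 b3 b4 c0 c1 c2 c3 c4 d0 d1 d2 d3 d4 e0 e1 e2 e3 e4 : Int) :
    pvSwap [e0,e1,e2,e3,a4,b0,b1,b2,b3,b4,c0,c1,c2,c3,c4,d0,d1,d2,d3,d4,a0,a1,a2,a3,e4] 4 20 = [e0,e1,e2,e3,e4,b0,b1,b2,b3,b4,c0,c1,c2,c3,c4,d0,d1,d2,d3,d4,a0,a1,a2,a3,a4] := rfl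

theorem pvSwO5 (a0 a1 a2 a3 a4 b0 b1 b2 b3 b4 c0 c1 c2 c3 c4 d0 d1 d2 d3 d4 e0 e1 e2 e3 e4 : Int) :
    pvSwap [e0,e1,e2,e3,e4,b0,b1,b2,b3,b4,c0,c1,c2,c3,c4,d0,d1,d2,d3,d4,a0,a1,a2,a3,a4] 5 10 = [e0,e1,e2,e3,e4,d0,b1,b2,b3,b4,c0,c1,c2,c3,c4,b0,d1,d2,d3,d4,a0,a1,a2,a3,a4] := rfl

theorem pvSwO6 (a0 a1 a2 a3 a4 b0 b1 b2 b3 b4 c0 c1 c2 c3 c4 d0 d1 d2 d3 d4 e0 e1 e2 e3 e4 : Int) :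
    pvSwap [e0,e1,e2,e3,e4,d0,b1,b2,b3,b4,c0,c1,c2,c3,c4,b0,d1,d2,d3,d4,a0,a1,a2,a3,a4] 9 10 = [e0,e1,e2,e3,e4,d0,b1,b2,b3,d4,c0,c1,c2,c3,c4,b0,d1,d2,d3,b4,a0,a1,a2,a3,a4] := rfl

theorem pvA_inner (a0 a1 a2 a3 a4 b0 b1 b2 b3 b4 c0 c1 c2 c3 c4 d0 d1 d2 d3 d4 e0 e1 e2 e3 e4 : Int) :
    upside_down_flip [[a0,a1,a2,a3,a4],[b0,b1,b2,b3,b4],[c0,c1,c2,c3,c4],[d0,d1,d2,d3,d4],[e0,e1,e2,e3,e4]] "inner" = [[a0,a1,a2,a3,a4],[b0,d1,d2,d3,b4],[c0,c1,c2,c3,c4],[d0,b1,b2,b3,d4],[e0,e1,e2,e3,e4]] := by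
  have hr : PySem.List.pyRange 6 9 1 = [6,7,8] := by decide
  unfold upside_down_flip
  simp only [String.reduceEq, reduceIte]
  rw [pvML, hr]
  simp only [List.foldl_cons, List.foldl_nil]
  rw [pvSwI0, pvSwI1, pvSwI2]
  exact pvMS a0 a1 a2 a3 a4 b0 d1 d2 d3 b4 c0 c1 c2 c3 c4 d0 b1 b2 b3 d4 e0 e1 e2 e3 e4

theorem pvA_outer (a0 a1 a2 a3 a4 b0 b1 b2 b3 b4 c0 c1 c2 c3 c4 d0 d1 d2 d3 d4 e0 e1 e2 e3 e4 : Int) :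
    upside_down_flip [[a0,a1,a2,a3,a4],[b0,b1,b2,b3,b4],[c0,c1,c2,c3,c4],[d0,d1,d2,d3,d4],[e0,e1,e2,e3,e4]] "outer" = [[e0,e1,e2,e3,e4],[d0,b1,b2,b3,d4],[c0,c1,c2,c3,c4],[b0,d1,d2,d3,b4],[a0,a1,a2,a3,a4]] := by
  have hr : PySem.List.pyRange 0 5 1 = [0,1,2,3,4] := by decide
  unfold upside_down_flip
  simp only [String.reduceEq, reduceIte]
  rw [pvML, hr]
  simp only [List.foldl_cons, List.foldl_nil]
  rw [pvSwO0, pvSwO1, pvSwO2, pvSwO3, pvSwO4, pvSwO5, pvSwO6]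
  exact pvMS e0 e1 e2 e3 e4 d0 b1 b2 b3 d4 c0 c1 c2 c3 c4 b0 d1 d2 d3 b4 a0 a1 a2 a3 a4

theorem pvA_other (a0 a1 a2 a3 a4 b0 b1 b2 b3 b4 c0 c1 c2 c3 c4 d0 d1 d2 d3 d4 e0 e1 e2 e3 e4 : Int) (ring : String)
    (hi : ¬ ring = "inner") (ho : ¬ ring = "outer") :
    upside_down_flip [[a0,a1,a2,a3,a4],[b0,b1,b2,b3,b4],[c0,c1,c2,c3,c4],[d0,d1,d2,d3,d4],[e0,e1,e2,e3,e4]] ring = [[a0,a1,a2,a3,a4],[b0,b1,b2,b3,b4],[c0,c1,c2,c3,c4],[d0,d1,d2,d3,d4],[e0,e1,e2,e3,e4]] := by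
  unfold upside_down_flip
  simp only [if_neg hi, if_neg ho]
  rw [pvML]
  exact pvMS a0 a1 a2 a3 a4 b0 b1 b2 b3 b4 c0 c1 c2 c3 c4 d0 d1 d2 d3 d4 e0 e1 e2 e3 e4

theorem pvB_inner (a0 a1 a2 a3 a4 b0 b1 b2 b3 b4 c0 c1 c2 c3 c4 d0 d1 d2 d3 d4 e0 e1 e2 e3 e4 : Int) :
    upside_down_flip_alt [[a0,a1,a2,a3,a4],[b0,b1,b2,b3,b4],[c0,c1,c2,c3,c4],[d0,d1,d2,d3,d4],[e0,e1,e2,e3,e4]] "inner" = [[a0,a1,a2,a3,a4],[b0,d1,d2,d3,b4],[c0,c1,c2,c3,c4],[d0,b1,b2,b3,d4],[e0,e1,e2,e3,e4]] := rfl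

theorem pvB_outer (a0 a1 a2 a3 a4 b0 b1 b2 b3 b4 c0 c1 c2 c3 c4 d0 d1 d2 d3 d4 e0 e1 e2 e3 e4 : Int) :
    upside_down_flip_alt [[a0,a1,a2,a3,a4],[b0,b1,b2,b3,b4],[c0,c1,c2,c3,c4],[d0,d1,d2,d3,d4],[e0,e1,e2,e3,e4]] "outer" = [[e0,e1,e2,e3,e4],[d0,b1,b2,b3,d4],[c0,c1,c2,c3,c4],[b0,d1,d2,d3,b4],[a0,a1,a2,a3,a4]] := rfl

theorem pvB_other (a0 a1 a2 a3 a4 b0 b1 b2 b3 b4 c0 c1 c2 c3 c4 d0 d1 d2 d3 d4 e0 e1 e2 e3 e4 : Int) (ring : String)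
    (hi : ¬ ring = "inner") (ho : ¬ ring = "outer") :
    upside_down_flip_alt [[a0,a1,a2,a3,a4],[b0,b1,b2,b3,b4],[c0,c1,c2,c3,c4],[d0,d1,d2,d3,d4],[e0,e1,e2,e3,e4]] ring = [[a0,a1,a2,a3,a4],[b0,b1,b2,b3,b4],[c0,c1,c2,c3,c4],[d0,d1,d2,d3,d4],[e0,e1,e2,e3,e4]] := by
  unfold upside_down_flip_alt
  simp only [if_neg hi, if_neg ho, List.map]

-- ===== VERDICT (by name: the statement is the Claim_ definition above) =====
theorem upside_down_flip_spec : Claim_equal_upside_down_flip := by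
  intro s ring _ hpre
  obtain ⟨hlen, hall⟩ := hpre
  match s, hlen with
  | [r0, r1, r2, r3, r4], _ =>
    simp only [List.all_cons, List.all_nil, Bool.and_true, Bool.and_eq_true,
      decide_eq_true_eq] at hall
    obtain ⟨h0, h1, h2, h3, h4⟩ := hall
    obtain ⟨a0, a1, a2, a3, a4, rfl⟩ := pvRow5 r0 h0
    obtain ⟨b0, b1, b2, b3, b4, rfl⟩ := pvRow5 r1 h1
    obtain ⟨c0, c1, c2, c3, c4, rfl⟩ := pvRow5 r2 h2
    obtain ⟨d0, d1, d2, d3, d4, rfl⟩ := pvRow5 r3 h3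
    obtain ⟨e0, e1, e2, e3, e4, rfl⟩ := pvRow5 r4 h4
    show Spec_upside_down_flip _ _ _
    unfold Spec_upside_down_flip
    by_cases hi : ring = "inner"
    · subst hi; rw [pvA_inner, pvB_inner]
    · by_cases ho : ring = "outer"
      · subst ho; rw [pvA_outer, pvB_outer]
      · rw [pvA_other a0 a1 a2 a3 a4 b0 b1 b2 b3 b4 c0 c1 c2 c3 c4 d0 d1 d2 d3 d4 e0 e1 e2 e3 e4 ring hi ho, pvB_other a0 a1 a2 a3 a4 b0 b1 b2 b3 b4 c0 c1 c2 c3 c4 d0 d1 d2 d3 d4 e0 e1 e2 e3 e4 ring hi ho]
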